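-- pv_equiv track=rewrite | github.com/cherryyjuicee/pythonProject1 | main.py | delete_Zero
-- ===== SOURCE A (Python) =====
-- def delete_Zero(m):
--     k = 0
--     a = []
--     for i in range(len(m)):
--         for j in range(len(m[i])):
--             if m[i][j] == 0:
--                 k += 1
--         if k != len(m[i]):
--             a.append(i)
--         k = 0
--     return a
-- ===== SOURCE B (Python) =====
-- def delete_Zero(m):
--     if not m:
--         return []
--     rest = [i + 1 for i in delete_Zero(m[1:])]
--     return rest if set(m[0]) <= {0} else [0] + rest
-- ===== Notes on version B (the rewrite author's own statement) =====
-- stated objective: alternative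
-- what changed: Replaces A's indexed double loop with a per-row zero count by structural recursion on the list of rows: recurse on the tail, shift the returned indices by +1, prepend 0 when the head row is not all zeros, deciding that with a set-subset test set(row) <= {0}.
import Mathlib
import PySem

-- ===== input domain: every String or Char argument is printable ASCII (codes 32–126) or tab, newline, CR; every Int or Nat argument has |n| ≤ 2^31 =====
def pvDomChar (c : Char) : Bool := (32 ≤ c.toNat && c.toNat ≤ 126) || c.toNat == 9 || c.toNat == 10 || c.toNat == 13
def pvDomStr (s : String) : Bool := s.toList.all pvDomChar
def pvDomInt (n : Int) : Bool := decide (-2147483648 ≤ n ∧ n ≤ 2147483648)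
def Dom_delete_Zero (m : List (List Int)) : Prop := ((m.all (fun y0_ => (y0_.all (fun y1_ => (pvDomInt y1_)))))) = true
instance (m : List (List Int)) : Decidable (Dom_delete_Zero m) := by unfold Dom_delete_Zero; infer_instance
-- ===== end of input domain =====

-- B replaces A's indexed double loop with a per-row zero count by structural recursion on the row list:
-- recurse on the tail, shift the returned indices by +1, and decide each row by a set-subset test set(row) <= {0} (simpler decomposition, same cost).

-- ===== PORT A =====
def delete_Zero (m : List (List Int)) : List Int :=
  (PySem.List.pyRange 0 (m.length : Int) 1).foldl
    (fun (a : List Int) (i : Int) =>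
      let row := PySem.List.pyGetD m i []
      let k : Int := (PySem.List.pyRange 0 (row.length : Int) 1).foldl
        (fun (k : Int) (j : Int) => if PySem.List.pyGetD row j 0 = 0 then k + 1 else k) 0
      if k ≠ (row.length : Int) then a ++ [i] else a)
    []

-- ===== PORT B =====
def delete_Zero_alt : List (List Int) → List Int
  | [] => []
  | r :: rest =>
      let restIdx := (delete_Zero_alt rest).map (fun i => i + 1)
      if PySem.Set.issubset (PySem.Set.ofList r) (PySem.Set.ofList [(0 : Int)]) then restIdx
      else 0 :: restIdx

-- ===== PRECONDITION & SPEC =====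
def Spec_delete_Zero (m : List (List Int)) (out : List Int) : Prop := out = delete_Zero_alt m
instance (m : List (List Int)) (out : List Int) : Decidable (Spec_delete_Zero m out) := by unfold Spec_delete_Zero; infer_instance

-- ===== CLAIM (what is proved, stated in full; the proofs are below) =====
def Claim_equal_delete_Zero : Prop := ∀ (m : List (List Int)), Dom_delete_Zero m → Spec_delete_Zero m (delete_Zero m)

-- ===== LEMMAS AND PROOFS =====

-- A's inner loop counts the zeros of the row.
theorem count_zeros_foldl (row : List Int) (c : Int) :
    row.foldl (fun (k : Int) (x : Int) => if x = 0 then k + 1 else k) c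
      = c + (row.countP (fun x => x == 0) : Int) := by
  induction row generalizing c with
  | nil => simp
  | cons x xs ih =>
      simp only [List.foldl_cons, List.countP_cons, ih]
      by_cases h : x = 0 <;> simp [h] <;> ring

-- A keeps a row iff it has a nonzero element.
theorem row_keep_iff (row : List Int) :
    ((row.foldl (fun (k : Int) (x : Int) => if x = 0 then k + 1 else k) 0 ≠ (row.length : Int))
      ↔ row.any (fun x => decide (x ≠ 0)) = true) := by
  rw [count_zeros_foldl, zero_add]
  constructor
  · intro h
    by_contra hany
    simp only [List.any_eq_true, not_exists, not_and, decide_eq_true_eq, not_not] at hany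
    have : row.countP (fun x => x == 0) = row.length := by
      apply List.countP_eq_length.mpr
      intro x hx; simpa using hany x hx
    exact h (by exact_mod_cast this)
  · intro h hc
    have hlen : row.countP (fun x => x == 0) = row.length := by exact_mod_cast hc
    obtain ⟨x, hx, hne⟩ := List.any_eq_true.mp h
    have := List.countP_eq_length.mp hlen x hx
    simp at this hne
    exact hne this

-- A is the filter of the index range by "row i has a nonzero element".
theorem A_eq_filter (m : List (List Int)) :
    delete_Zero m
      = (PySem.List.pyRange 0 (m.length : Int) 1).filter
          (fun i => (PySem.List.pyGetD m i []).any (fun x => decide (x ≠ 0))) := by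
  unfold delete_Zero
  refine Eq.trans (PySem.List.foldl_append_ite_eq_filter
    (fun i => (PySem.List.pyRange 0 (((PySem.List.pyGetD m i []).length : Int))).foldl
        (fun (k : Int) (j : Int) => if PySem.List.pyGetD (PySem.List.pyGetD m i []) j 0 = 0 then k + 1 else k) 0
      ≠ (((PySem.List.pyGetD m i []).length : Int))) _ []) ?_
  rw [List.nil_append]
  apply List.filter_congr
  intro i _
  rw [PySem.List.foldl_pyRange_zero_pyGetD' (PySem.List.pyGetD m i []) 0
    (fun (k x : Int) => if x = 0 then k + 1 else k) 0]
  simp only [row_keep_iff, Bool.decide_eq_true]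

-- B's subset test set(row) <= {0} decides "all elements are zero".
theorem subset_iff_all_zero (r : List Int) :
    PySem.Set.issubset (PySem.Set.ofList r) (PySem.Set.ofList [(0 : Int)]) = true
      ↔ ∀ x ∈ r, x = 0 := by
  rw [PySem.Set.issubset_iff]
  simp [PySem.Set.mem_ofList]

-- Filtering the shifted range 1..n+1 is filtering 0..n and shifting.
theorem filter_pyRange_shift (p : Int → Bool) (n : Nat) :
    (PySem.List.pyRange 1 ((n : Int) + 1) 1).filter p
      = ((PySem.List.pyRange 0 (n : Int) 1).filter (fun i => p (i + 1))).map (fun i => i + 1) := by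
  rw [PySem.List.pyRange_one, PySem.List.pyRange_one]
  have h1 : ((n : Int) + 1 - 1).toNat = n := by omega
  have h2 : ((n : Int) - 0).toNat = n := by omega
  rw [h1, h2]
  simp only [List.filter_map, List.map_map, Function.comp_def, zero_add]
  have hc : (fun k : Nat => p (1 + (k : Int))) = (fun k : Nat => p ((k : Int) + 1)) := by
    funext k; rw [Int.add_comm]
  rw [hc]
  congr 1
  funext k; rw [Int.add_comm]

-- B equals the same filter.
theorem B_eq_filter (m : List (List Int)) :
    delete_Zero_alt m
      = (PySem.List.pyRange 0 (m.length : Int) 1).filter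
          (fun i => (PySem.List.pyGetD m i []).any (fun x => decide (x ≠ 0))) := by
  induction m with
  | nil => simp [delete_Zero_alt, PySem.List.pyRange_one_eq_nil]
  | cons r rest ih =>
      have hcons : PySem.List.pyRange 0 ((rest.length : Int) + 1) 1
          = 0 :: PySem.List.pyRange 1 ((rest.length : Int) + 1) 1 := by
        rw [PySem.List.pyRange_one_cons (by positivity)]
        norm_num
      simp only [delete_Zero_alt, List.length_cons, Nat.cast_add, Nat.cast_one, hcons,
        List.filter_cons]
      rw [filter_pyRange_shift]
      have hget : ∀ i ∈ PySem.List.pyRange 0 ((rest.length : Int)) 1,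
          PySem.List.pyGetD (r :: rest) (i + 1) ([] : List Int) = PySem.List.pyGetD rest i [] := by
        intro i hi
        rcases (PySem.List.mem_pyRange_one).mp hi with ⟨h0, _⟩
        rw [PySem.List.pyGetD_of_nonneg (r :: rest) ([] : List Int) (by omega),
            PySem.List.pyGetD_of_nonneg rest ([] : List Int) h0]
        have h1 : (i + 1).toNat = i.toNat + 1 := by omega
        simp [h1]
      rw [List.filter_congr (fun i hi => by rw [hget i hi])]
      by_cases hsub : PySem.Set.issubset (PySem.Set.ofList r) (PySem.Set.ofList [(0 : Int)]) = true
      · have h0 := (subset_iff_all_zero r).mp hsub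
        simp [hsub, PySem.List.pyGetD_of_nonneg, ih]
        exact h0
      · have hex : ∃ x ∈ r, ¬ x = 0 := by
          by_contra hh
          simp only [not_exists, not_and, not_not] at hh
          exact hsub ((subset_iff_all_zero r).mpr hh)
        have h0' : ¬ ∀ x ∈ r, x = 0 := by
          rcases hex with ⟨x, hx, hxne⟩
          exact fun hh => hxne (hh x hx)
        simp [PySem.List.pyGetD_of_nonneg, ih, h0', hex]

-- ===== VERDICT (by name: the statement is the Claim_ definition above) =====
theorem delete_Zero_spec : Claim_equal_delete_Zero := by
  intro m _
  unfold Spec_delete_Zero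
  rw [A_eq_filter, B_eq_filter]
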